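-- pv_equiv track=rewrite | github.com/ziidx/383MustardAnalytics | mustard_analytics.py | num_single_locs
-- ===== SOURCE A (Python) =====
-- def num_single_locs(rows):
--     """Return the number of refueling locations that were visited exactly once.
--
--     Hint: store the locations and counts (as keys and values, respectively) in a dictionary,
--     then count up the number of entries with a value equal to one.
--     """
--     num = 0  # delete this line!
--     #
--     # fill in function body here
--     #
--     locations = {}
--     for x in rows:												# Iterates through 'rows' list. Stores the count of occurences of a location in locations dictionary
--     	if x[2] != None:
--     		if x[2] in locations:
--     			locations[x[2]] += 1
--     		else:
--     			locations[x[2]] = 1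
--
--     for i in locations.values():
--     	if i == 1:
--     		num += 1
--
--     return num
-- ===== SOURCE B (Python) =====
-- def num_single_locs(rows):
--     seen_once = set()
--     seen_many = set()
--     for x in rows:
--         loc = x[2]
--         if loc is None:
--             continue
--         if loc in seen_many:
--             continue
--         if loc in seen_once:
--             seen_once.discard(loc)
--             seen_many.add(loc)
--         else:
--             seen_once.add(loc)
--     return len(seen_once)
-- ===== Notes on version B (the rewrite author's own statement) =====
-- stated objective: alternative
-- what changed: Replaced the count-dictionary plus a second scan over its values with a single pass that partitions locations into a seen-once set and a seen-many set and returns the size of the former.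
import Mathlib
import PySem

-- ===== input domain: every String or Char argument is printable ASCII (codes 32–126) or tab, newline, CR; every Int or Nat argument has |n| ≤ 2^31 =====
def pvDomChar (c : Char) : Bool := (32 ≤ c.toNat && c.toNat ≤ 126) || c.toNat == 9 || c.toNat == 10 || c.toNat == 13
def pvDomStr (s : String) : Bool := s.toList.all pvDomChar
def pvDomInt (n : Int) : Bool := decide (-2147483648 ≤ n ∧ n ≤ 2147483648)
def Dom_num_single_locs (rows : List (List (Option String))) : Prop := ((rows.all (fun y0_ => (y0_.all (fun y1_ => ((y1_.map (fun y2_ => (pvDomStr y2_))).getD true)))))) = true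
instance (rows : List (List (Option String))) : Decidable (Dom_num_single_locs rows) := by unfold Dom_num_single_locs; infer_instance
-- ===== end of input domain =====

-- B replaces A's count-dictionary + second scan over its values by a single pass that
-- partitions locations into a seen-once set and a seen-many set (objective: alternative).

-- ===== PORT A =====
-- literal port: build a count dict over rows (skipping x[2] == None), then count values equal to 1
def num_single_locs (rows : List (List (Option String))) : Int :=
  let locations : PySem.Dict String Int :=
    rows.foldl (fun d x =>
      match PySem.List.pyGet? x 2 with   -- x[2]; none = IndexError, excluded by Pre_
      | some (some v) =>
          if PySem.Dict.contains d v then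
            PySem.Dict.insert d v (PySem.Dict.getD d v 0 + 1)   -- locations[x[2]] += 1
          else
            PySem.Dict.insert d v 1                             -- locations[x[2]] = 1
      | _ => d)                                                 -- x[2] == None: skip
      PySem.Dict.empty
  (PySem.Dict.values locations).foldl (fun num i => if i == 1 then num + 1 else num) 0

-- ===== PORT B =====
-- literal port of Source B: one pass maintaining (seen_once, seen_many); return len(seen_once)
def num_single_locs_alt (rows : List (List (Option String))) : Int :=
  let st : PySem.Set String × PySem.Set String :=
    rows.foldl (fun st x =>
      match PySem.List.pyGet? x 2 with   -- loc = x[2]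
      | none => st
      | some none => st                   -- loc is None: continue
      | some (some loc) =>
          if PySem.Set.contains st.2 loc then st
          else if PySem.Set.contains st.1 loc then
            (PySem.Set.discard st.1 loc, PySem.Set.add st.2 loc)
          else
            (PySem.Set.add st.1 loc, st.2))
      (PySem.Set.empty, PySem.Set.empty)
  PySem.Set.len st.1

-- ===== PRECONDITION & SPEC =====
-- Pre_ excludes exactly the inputs on which Python A raises IndexError: a row shorter than 3.
def Pre_num_single_locs (rows : List (List (Option String))) : Prop :=
  ∀ x ∈ rows, 3 ≤ x.length
instance (rows : List (List (Option String))) : Decidable (Pre_num_single_locs rows) := by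
  unfold Pre_num_single_locs; infer_instance

def pvWitness_num_single_locs : List (List (Option String)) :=
  [[none, none, some "a"], [some "x", none, some "b"], [none, none, some "a"]]

def Spec_num_single_locs (rows : List (List (Option String))) (out : Int) : Prop := out = num_single_locs_alt rows
instance (rows : List (List (Option String))) (out : Int) : Decidable (Spec_num_single_locs rows out) := by unfold Spec_num_single_locs; infer_instance

-- ===== CLAIM (what is proved, stated in full; the proofs are below) =====
def Claim_equal_num_single_locs : Prop := ∀ (rows : List (List (Option String))), Dom_num_single_locs rows → Pre_num_single_locs rows → Spec_num_single_locs rows (num_single_locs rows)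

-- ===== LEMMAS AND PROOFS =====

-- the sequence of non-None third entries of rows
def pvLocs (rows : List (List (Option String))) : List String :=
  rows.filterMap (fun x =>
    match PySem.List.pyGet? x 2 with
    | some (some v) => some v
    | _ => none)

-- both loops only look at the extracted location: a fold over rows is a fold over pvLocs rows
theorem pvFoldl_locs {σ : Type} (g : σ → String → σ) (rows : List (List (Option String))) (init : σ) :
    rows.foldl (fun s x =>
      match PySem.List.pyGet? x 2 with
      | some (some v) => g s v
      | _ => s) init
    = (pvLocs rows).foldl g init := by
  induction rows generalizing init with
  | nil => rfl
  | cons x rows ih =>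
      simp only [List.foldl_cons, pvLocs, List.filterMap_cons]
      cases h : PySem.List.pyGet? x 2 with
      | none => simpa [pvLocs] using ih init
      | some o =>
          cases o with
          | none => simpa [pvLocs] using ih init
          | some v => simpa [pvLocs] using (ih (g init v))

-- same, for B's three-case match shape
theorem pvFoldl_locsB {σ : Type} (g : σ → String → σ) (rows : List (List (Option String))) (init : σ) :
    rows.foldl (fun s x =>
      match PySem.List.pyGet? x 2 with
      | none => s
      | some none => s
      | some (some v) => g s v) init
    = (pvLocs rows).foldl g init := by
  induction rows generalizing init with
  | nil => rfl
  | cons x rows ih =>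
      simp only [List.foldl_cons, pvLocs, List.filterMap_cons]
      cases h : PySem.List.pyGet? x 2 with
      | none => simpa [pvLocs] using ih init
      | some o =>
          cases o with
          | none => simpa [pvLocs] using ih init
          | some v => simpa [pvLocs] using (ih (g init v))

-- A's per-element step is the counter step
theorem pvAstep (d : PySem.Dict String Int) (v : String) :
    (if PySem.Dict.contains d v then
       PySem.Dict.insert d v (PySem.Dict.getD d v 0 + 1)
     else PySem.Dict.insert d v 1)
    = PySem.Dict.insert d v (PySem.Dict.getD d v 0 + 1) := by
  by_cases h : PySem.Dict.contains d v = true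
  · simp [h]
  · rw [if_neg h, PySem.Dict.getD_of_not_contains d 0 (by simpa using h)]
    norm_num

-- the seen-once set after folding l
def pvOnce (l : List String) : List String :=
  (PySem.Set.ofList l).filter (fun v => l.count v == 1)

def pvBstep (st : PySem.Set String × PySem.Set String) (loc : String) :
    PySem.Set String × PySem.Set String :=
  if PySem.Set.contains st.2 loc then st
  else if PySem.Set.contains st.1 loc then
    (PySem.Set.discard st.1 loc, PySem.Set.add st.2 loc)
  else
    (PySem.Set.add st.1 loc, st.2)

-- loop invariant for B, proved by right-to-left induction
theorem pvBinv (l : List String) :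
    (l.foldl pvBstep (PySem.Set.empty, PySem.Set.empty)).1 = pvOnce l ∧
    (∀ v, v ∈ (l.foldl pvBstep (PySem.Set.empty, PySem.Set.empty)).2 ↔ v ∈ l ∧ l.count v ≠ 1) := by
  induction l using List.reverseRecOn with
  | nil => simp [pvOnce, PySem.Set.empty, PySem.Set.ofList]
  | append_singleton l x ih =>
      obtain ⟨h1, h2⟩ := ih
      rw [List.foldl_append]
      set st := l.foldl pvBstep (PySem.Set.empty, PySem.Set.empty) with hst
      have hcnt : ∀ v : String, (l ++ [x]).count v = l.count v + if x = v then 1 else 0 := by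
        intro v; rw [List.count_append]; by_cases h : x = v <;> simp [h]
      rw [List.foldl_cons, List.foldl_nil]
      by_cases hx2 : x ∈ st.2
      · -- x already seen many times: nothing changes
        have hxl : x ∈ l ∧ l.count x ≠ 1 := (h2 x).mp hx2
        have hxpos : 1 ≤ l.count x := List.count_pos_iff.mpr hxl.1
        have hstep : pvBstep st x = st := by simp [pvBstep, hx2]
        rw [hstep]
        constructor
        · rw [h1]
          unfold pvOnce
          rw [PySem.Set.ofList_append_singleton,
              show PySem.Set.add (PySem.Set.ofList l) x = PySem.Set.ofList l from by
                simp [PySem.Set.add, PySem.Set.mem_ofList, hxl.1]]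
          apply List.filter_congr
          intro v hv
          rw [hcnt v, Bool.eq_iff_iff]
          simp only [beq_iff_eq]
          by_cases hvx : x = v
          · subst hvx; have := hxl.2; omega
          · simp [hvx]
        · intro v
          rw [h2 v]
          constructor
          · rintro ⟨hvl, hvc⟩
            refine ⟨by simp [hvl], ?_⟩
            rw [hcnt v]
            by_cases hvx : x = v
            · subst hvx; omega
            · simpa [hvx] using hvc
          · rintro ⟨hvl, hvc⟩
            rw [hcnt v] at hvc
            by_cases hvx : x = v
            · subst hvx; exact ⟨hxl.1, hxl.2⟩
            · refine ⟨?_, by simpa [hvx] using hvc⟩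
              rcases List.mem_append.mp hvl with h | h
              · exact h
              · simp at h; exact absurd h.symm hvx
      · by_cases hx1 : x ∈ st.1
        · -- second sighting: move x from seen_once to seen_many
          have hxo : x ∈ pvOnce l := h1 ▸ hx1
          have hxc : l.count x = 1 := by
            have := List.of_mem_filter hxo; simpa using this
          have hxl : x ∈ l := by
            have := List.mem_of_mem_filter hxo
            simpa [PySem.Set.mem_ofList] using this
          have hstep : pvBstep st x = (PySem.Set.discard st.1 x, PySem.Set.add st.2 x) := by
            simp [pvBstep, hx1, hx2]
          rw [hstep]
          constructor
          · show PySem.Set.discard st.1 x = pvOnce (l ++ [x])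
            rw [h1]
            unfold pvOnce
            rw [PySem.Set.ofList_append_singleton,
                show PySem.Set.add (PySem.Set.ofList l) x = PySem.Set.ofList l from by
                  simp [PySem.Set.add, PySem.Set.mem_ofList, hxl]]
            show List.filter (fun y => y != x)
                (List.filter (fun v => List.count v l == 1) (PySem.Set.ofList l)) = _
            rw [List.filter_filter]
            apply List.filter_congr
            intro v hv
            rw [hcnt v, Bool.eq_iff_iff]
            simp only [Bool.and_eq_true, beq_iff_eq, bne_iff_ne, ne_eq]
            by_cases hvx : x = v
            · subst hvx; simp [hxc]
            · simp [hvx, Ne.symm hvx]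
          · intro v
            rw [show (PySem.Set.discard st.1 x, PySem.Set.add st.2 x).2 = PySem.Set.add st.2 x from rfl,
                PySem.Set.mem_add, h2 v]
            constructor
            · rintro (⟨hvl, hvc⟩ | hvx)
              · refine ⟨by simp [hvl], ?_⟩
                rw [hcnt v]
                by_cases hvx : x = v
                · subst hvx; omega
                · simpa [hvx] using hvc
              · subst hvx
                refine ⟨by simp, ?_⟩
                rw [hcnt v]; simp [hxc]
            · rintro ⟨hvl, hvc⟩
              by_cases hvx : x = v
              · right; exact hvx.symm
              · left
                rw [hcnt v] at hvc
                refine ⟨?_, by simpa [hvx] using hvc⟩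
                rcases List.mem_append.mp hvl with h | h
                · exact h
                · simp at h; exact absurd h.symm hvx
        · -- first sighting of x
          have hxnl : x ∉ l := by
            intro hxl
            by_cases hc : l.count x = 1
            · exact hx1 (h1 ▸ (by
                unfold pvOnce
                exact List.mem_filter.mpr ⟨(PySem.Set.mem_ofList l x).mpr hxl, by simp [hc]⟩))
            · exact hx2 ((h2 x).mpr ⟨hxl, hc⟩)
          have hxc0 : l.count x = 0 := List.count_eq_zero.mpr hxnl
          have hstep : pvBstep st x = (PySem.Set.add st.1 x, st.2) := by
            simp [pvBstep, hx1, hx2]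
          rw [hstep]
          constructor
          · show PySem.Set.add st.1 x = pvOnce (l ++ [x])
            rw [h1]
            have hxno : x ∉ pvOnce l := h1 ▸ hx1
            unfold pvOnce
            rw [PySem.Set.ofList_append_singleton,
                show PySem.Set.add (PySem.Set.ofList l) x = PySem.Set.ofList l ++ [x] from by
                  simp [PySem.Set.add, PySem.Set.mem_ofList, hxnl]]
            rw [List.filter_append]
            have hpx : ((l ++ [x]).count x == 1) = true := by
              rw [hcnt x]; simp [hxc0]
            simp only [List.filter_cons, hpx, if_true, List.filter_nil]
            have hfc : (PySem.Set.ofList l).filter (fun v => (l ++ [x]).count v == 1)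
                = (PySem.Set.ofList l).filter (fun v => l.count v == 1) := by
              apply List.filter_congr
              intro v hv
              rw [hcnt v]
              have hvx : x ≠ v := by
                intro h; subst h
                exact hxnl (by simpa [PySem.Set.mem_ofList] using hv)
              simp [hvx]
            rw [hfc]
            simp [PySem.Set.add, PySem.Set.mem_ofList, hxnl]
          · intro v
            rw [show (PySem.Set.add st.1 x, st.2).2 = st.2 from rfl, h2 v]
            constructor
            · rintro ⟨hvl, hvc⟩
              have hvx : x ≠ v := by intro h; subst h; exact hxnl hvl
              refine ⟨by simp [hvl], ?_⟩
              rw [hcnt v]; simpa [hvx] using hvc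
            · rintro ⟨hvl, hvc⟩
              rw [hcnt v] at hvc
              by_cases hvx : x = v
              · subst hvx; simp [hxc0] at hvc
              · refine ⟨?_, by simpa [hvx] using hvc⟩
                rcases List.mem_append.mp hvl with h | h
                · exact h
                · simp at h; exact absurd h.symm hvx

-- A reduced to a count over the distinct locations
theorem pvA_closed (l : List String) :
    ((PySem.Dict.counter l (κ := String)).values).foldl
        (fun num i => if i == 1 then num + 1 else num) 0
    = ((pvOnce l).length : Int) := by
  rw [PySem.List.foldl_beq_add_one]
  have hv : (PySem.Dict.counter l (κ := String)).values
      = (PySem.Set.ofList l).map (fun k => (l.count k : Int)) := by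
    show (PySem.Dict.counter l (κ := String)).items.map (·.2) = _
    rw [PySem.Dict.items_counter]
    simp [List.map_map, Function.comp]
  rw [hv]
  unfold pvOnce
  rw [List.count_eq_countP, List.countP_map, ← List.countP_eq_length_filter]
  simp only [zero_add]
  norm_cast
  apply List.countP_congr
  intro v _
  simp only [Function.comp]
  constructor
  · intro h
    have : (l.count v : Int) = 1 := by simpa using h
    simp [show l.count v = 1 by exact_mod_cast this]
  · intro h
    have : l.count v = 1 := by simpa using h
    simp [this]

-- ===== VERDICT (by name: the statement is the Claim_ definition above) =====
theorem num_single_locs_spec : Claim_equal_num_single_locs := by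
  intro rows _ _
  show num_single_locs rows = num_single_locs_alt rows
  simp only [num_single_locs, num_single_locs_alt]
  refine Eq.trans (congrArg
      (fun d : PySem.Dict String Int =>
        (PySem.Dict.values d).foldl (fun num i => if i == 1 then num + 1 else num) 0)
      (pvFoldl_locs (fun d v =>
        if PySem.Dict.contains d v then
          PySem.Dict.insert d v (PySem.Dict.getD d v 0 + 1)
        else PySem.Dict.insert d v 1) rows PySem.Dict.empty)) ?_
  refine Eq.trans ?_ (congrArg
      (fun st : PySem.Set String × PySem.Set String => PySem.Set.len st.1)
      (pvFoldl_locsB pvBstep rows (PySem.Set.empty, PySem.Set.empty)).symm)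
  beta_reduce
  rw [PySem.List.foldl_congr_mem
        (l := pvLocs rows) (init := PySem.Dict.empty)
        (f := fun d v =>
          if PySem.Dict.contains d v then
            PySem.Dict.insert d v (PySem.Dict.getD d v 0 + 1)
          else PySem.Dict.insert d v 1)
        (g := fun d v => PySem.Dict.insert d v (PySem.Dict.getD d v 0 + 1))
        (fun d v _ => pvAstep d v),
      PySem.Dict.foldl_insert_getD_add_one_eq_counter, pvA_closed, (pvBinv (pvLocs rows)).1]
  rfl
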